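-- pv_equiv track=rewrite | github.com/EMBKSM/Algorithms | Python3/프로그래머스/0/181932. 코드 처리하기/코드 처리하기.py | solution
-- ===== SOURCE A (Python) =====
-- def solution(code):
--     answer = ''
--     mode = 0
--     for i, c in enumerate(code):
--         if c == '1':
--             mode ^= 1
--         else:
--             if i % 2 == mode:
--                 answer += c
--     return answer if answer else 'EMPTY'
-- ===== SOURCE B (Python) =====
-- def solution(code):
--     # Split on '1': segment j (0-based) starts at global index pos and its chars
--     # are kept exactly at local offsets with parity (j + pos) % 2, so each kept
--     # piece is a strided slice -- no per-character parity test at all.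
--     parts = code.split('1')
--     out = []
--     pos = 0
--     for j, seg in enumerate(parts):
--         out.append(seg[(j + pos) % 2::2])
--         pos += len(seg) + 1
--     return ''.join(out) or 'EMPTY'
-- ===== Notes on version B (the rewrite author's own statement) =====
-- stated objective: faster
-- what changed: Instead of scanning characters with a toggling mode flag, B splits the code into segments between the toggle characters and extracts from segment j (starting at global index pos) the strided slice seg[(j+pos)%2::2]; the per-character keep test and the mode accumulator disappear, moving the work into C-level str.split and slicing.
import Mathlib
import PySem

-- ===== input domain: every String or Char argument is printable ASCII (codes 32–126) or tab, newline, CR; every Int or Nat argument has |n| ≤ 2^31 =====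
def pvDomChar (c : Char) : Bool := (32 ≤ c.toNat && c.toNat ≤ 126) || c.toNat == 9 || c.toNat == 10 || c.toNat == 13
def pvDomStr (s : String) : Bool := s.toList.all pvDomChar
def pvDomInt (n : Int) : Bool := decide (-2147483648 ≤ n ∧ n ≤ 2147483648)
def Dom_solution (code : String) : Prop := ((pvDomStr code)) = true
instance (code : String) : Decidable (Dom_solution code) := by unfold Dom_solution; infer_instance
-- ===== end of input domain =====

-- B replaces A's mode-toggling per-character scan by splitting the code on '1' and
-- taking a strided slice seg[(j+pos)%2::2] of each segment (objective: faster by a constant factor, measured: bulk split/slicing instead of a per-character Python loop).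

-- ===== PORT A =====
-- A's for loop: state = current index i, mode, accumulated answer
def solLoopA : List Char → Nat → Nat → List Char → List Char
  | [], _, _, answer => answer
  | c :: cs, i, mode, answer =>
    if c = '1' then solLoopA cs (i + 1) (mode ^^^ 1) answer
    else if i % 2 = mode then solLoopA cs (i + 1) mode (answer ++ [c])
    else solLoopA cs (i + 1) mode answer

def solution (code : String) : String :=
  let answer := solLoopA code.toList 0 0 []
  if answer.isEmpty then "EMPTY" else String.ofList answer

-- ===== PORT B =====
-- code.split('1') on the character list (Python str.split with separator '1')
def splitOn1 : List Char → List (List Char)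
  | [] => [[]]
  | c :: cs =>
    let r := splitOn1 cs
    if c = '1' then [] :: r
    else (c :: r.headD []) :: r.tail

-- seg[off::2]: stride-2 slice (off already dropped)
def stride2 : List Char → List Char
  | [] => []
  | [c] => [c]
  | c :: _ :: cs => c :: stride2 cs

-- the for loop over enumerate(parts): j = segment index, pos = global start index
def segLoop : List (List Char) → Nat → Nat → List Char
  | [], _, _ => []
  | seg :: rest, j, pos =>
    stride2 (seg.drop ((j + pos) % 2)) ++ segLoop rest (j + 1) (pos + seg.length + 1)

def solution_alt (code : String) : String :=
  let kept := segLoop (splitOn1 code.toList) 0 0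
  if kept.isEmpty then "EMPTY" else String.ofList kept

-- ===== PRECONDITION & SPEC =====
def Spec_solution (code : String) (out : String) : Prop := out = solution_alt code
instance (code : String) (out : String) : Decidable (Spec_solution code out) := by unfold Spec_solution; infer_instance

-- ===== CLAIM =====
def Claim_equal_solution : Prop := ∀ (code : String), Dom_solution code → Spec_solution code (solution code)

-- ===== LEMMAS AND PROOFS =====
theorem splitOn1_ne_nil (cs : List Char) : splitOn1 cs ≠ [] := by
  cases cs with
  | nil => simp [splitOn1]
  | cons c cs => simp only [splitOn1]; split <;> simp

theorem stride2_cons (c : Char) (cs : List Char) :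
    stride2 (c :: cs) = c :: stride2 (cs.drop 1) := by
  cases cs <;> simp [stride2]

theorem xor_parity (j : Nat) : (j % 2) ^^^ 1 = (j + 1) % 2 := by
  rcases Nat.mod_two_eq_zero_or_one j with h | h <;> simp [h] <;> omega

theorem solLoopA_eq_segLoop (cs : List Char) : ∀ (j pos : Nat) (acc : List Char),
    solLoopA cs pos (j % 2) acc = acc ++ segLoop (splitOn1 cs) j pos := by
  induction cs with
  | nil => intro j pos acc; simp [solLoopA, splitOn1, segLoop, stride2]
  | cons c cs ih =>
    intro j pos acc
    by_cases h1 : c = '1'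
    · simp only [solLoopA, splitOn1, h1]
      rw [xor_parity, ih (j + 1) (pos + 1) acc]
      simp [segLoop, stride2]
    · rcases hs : splitOn1 cs with _ | ⟨s, rest⟩
      · exact absurd hs (splitOn1_ne_nil cs)
      · by_cases h2 : pos % 2 = j % 2
        · have hoff : (j + pos) % 2 = 0 := by omega
          have hoff' : (j + (pos + 1)) % 2 = 1 := by omega
          simp only [solLoopA, splitOn1, h1, if_pos h2]
          rw [ih j (pos + 1) (acc ++ [c])]
          simp [hs, segLoop, hoff, hoff']
          rw [stride2_cons, List.drop_one,
            show pos + (s.length + 1) + 1 = pos + 1 + s.length + 1 from by omega]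
          simp
        · have hoff : (j + pos) % 2 = 1 := by omega
          have hoff' : (j + (pos + 1)) % 2 = 0 := by omega
          simp only [solLoopA, splitOn1, h1, if_neg h2]
          rw [ih j (pos + 1) acc]
          simp [hs, segLoop, hoff, hoff']
          rw [show pos + (s.length + 1) + 1 = pos + 1 + s.length + 1 from by omega]

-- ===== VERDICT =====
theorem solution_spec : Claim_equal_solution := by
  intro code _
  unfold Spec_solution solution solution_alt
  have h := solLoopA_eq_segLoop code.toList 0 0 []
  simp at h
  simp [h]
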